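-- pv_equiv track=rewrite | github.com/ehsieh0715/Forkcast-Smart-Restaurant-Recommender | app/Backend/app/utils/main_utils.py | compute_intervals
-- ===== SOURCE A (Python) =====
-- def compute_intervals(hour_flags: list[bool]) -> list[tuple[int, int]]:
--     """Return contiguous open-close hour blocks from list of True/False flags."""
--     intervals = []
--     start = None
--     for hour, is_open in enumerate(hour_flags + [False]):
--         if is_open and start is None:
--             start = hour
--         elif not is_open and start is not None:
--             intervals.append((start, hour))
--             start = None
--     return intervals
-- ===== SOURCE B (Python) =====
-- from itertools import groupby
--
-- def compute_intervals(hour_flags: list[bool]) -> list[tuple[int, int]]: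
--     """Return contiguous open-close hour blocks from list of True/False flags."""
--     intervals = []
--     offset = 0
--     for value, group in groupby(hour_flags):
--         length = sum(1 for _ in group)
--         if value:
--             intervals.append((offset, offset + length))
--         offset += length
--     return intervals
-- ===== Notes on version B (the rewrite author's own statement) =====
-- stated objective: idiomatic
-- what changed: Replaces the start/None state machine with a '+ [False]' sentinel by itertools.groupby over consecutive runs: each True run of length L starting at the running offset yields (offset, offset+L).
import Mathlib
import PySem

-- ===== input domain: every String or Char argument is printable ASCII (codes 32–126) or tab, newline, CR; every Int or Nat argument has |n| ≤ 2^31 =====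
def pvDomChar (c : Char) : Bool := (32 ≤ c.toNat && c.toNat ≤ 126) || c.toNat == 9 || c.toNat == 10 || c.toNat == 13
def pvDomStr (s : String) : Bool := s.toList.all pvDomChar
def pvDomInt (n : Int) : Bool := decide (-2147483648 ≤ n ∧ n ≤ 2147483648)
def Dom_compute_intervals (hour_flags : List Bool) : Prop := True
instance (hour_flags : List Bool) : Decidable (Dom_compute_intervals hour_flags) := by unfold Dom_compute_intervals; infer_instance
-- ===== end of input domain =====

-- B replaces A's start/None state machine (with its '+ [False]' sentinel) by a groupby over
-- consecutive runs: idiomatic, same O(n) cost; return values proved identical on all inputs.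

-- ===== PORT A =====
-- the for-loop over enumerate(hour_flags + [False]) with state (intervals, start),
-- written as the obvious structural recursion carrying the hour counter
def computeIntervalsLoopA (xs : List Bool) (hour : Int) (start : Option Int)
    (intervals : List (Int × Int)) : List (Int × Int) :=
  match xs with
  | [] => intervals
  | is_open :: rest =>
    match is_open, start with
    | true,  none   => computeIntervalsLoopA rest (hour + 1) (some hour) intervals
    | false, some s => computeIntervalsLoopA rest (hour + 1) none (intervals ++ [(s, hour)])
    | _,     _      => computeIntervalsLoopA rest (hour + 1) start intervals

def compute_intervals (hour_flags : List Bool) : List (Int × Int) :=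
  computeIntervalsLoopA (hour_flags ++ [false]) 0 none []

-- ===== PORT B =====
-- the for-loop over groupby(hour_flags): peel off one maximal run of equal flags per step,
-- emit (offset, offset+length) for a True run, advance the offset by the run length
def computeIntervalsLoopB (xs : List Bool) (offset : Int) : List (Int × Int) :=
  match xs with
  | [] => []
  | v :: rest =>
    let length : Nat := 1 + (rest.takeWhile (· == v)).length
    (if v then [(offset, offset + (length : Int))] else []) ++
      computeIntervalsLoopB (rest.dropWhile (· == v)) (offset + (length : Int))
termination_by xs.length
decreasing_by
  simpa using Nat.lt_succ_of_le (List.length_dropWhile_le (· == v) rest)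

def compute_intervals_alt (hour_flags : List Bool) : List (Int × Int) :=
  computeIntervalsLoopB hour_flags 0

-- ===== PRECONDITION & SPEC =====
def Spec_compute_intervals (hour_flags : List Bool) (out : List (Int × Int)) : Prop := out = compute_intervals_alt hour_flags
instance (hour_flags : List Bool) (out : List (Int × Int)) : Decidable (Spec_compute_intervals hour_flags out) := by unfold Spec_compute_intervals; infer_instance

-- ===== CLAIM (what is proved, stated in full; the proofs are below) =====
def Claim_equal_compute_intervals : Prop := ∀ (hour_flags : List Bool), Dom_compute_intervals hour_flags → Spec_compute_intervals hour_flags (compute_intervals hour_flags)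

-- ===== LEMMAS AND PROOFS =====

-- consuming a leading False is the same as merging it into the next False run
lemma loopB_false_cons (rest : List Bool) (off : Int) :
    computeIntervalsLoopB (false :: rest) off = computeIntervalsLoopB rest (off + 1) := by
  cases rest with
  | nil => simp [computeIntervalsLoopB]
  | cons b t =>
    cases b with
    | false =>
      simp only [computeIntervalsLoopB, List.takeWhile, List.dropWhile]
      simp only [beq_self_eq_true, if_false, List.length_cons]
      push_cast
      ring_nf
    | true =>
      simp [computeIntervalsLoopB]

-- joint invariant for A's loop in the closed (start = none) and open (start = some s) states
lemma loopA_eq_loopB (flags : List Bool) :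
    (∀ (off : Int) (acc : List (Int × Int)),
        computeIntervalsLoopA (flags ++ [false]) off none acc
          = acc ++ computeIntervalsLoopB flags off)
    ∧ (∀ (off s : Int) (acc : List (Int × Int)),
        computeIntervalsLoopA (flags ++ [false]) off (some s) acc
          = acc ++ (s, off + ((flags.takeWhile (· == true)).length : Int))
              :: computeIntervalsLoopB (flags.dropWhile (· == true))
                  (off + ((flags.takeWhile (· == true)).length : Int))) := by
  induction flags with
  | nil =>
    constructor
    · intro off acc; simp [computeIntervalsLoopA, computeIntervalsLoopB]
    · intro off s acc; simp [computeIntervalsLoopA, computeIntervalsLoopB]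
  | cons v rest ih =>
    obtain ⟨ihn, ihs⟩ := ih
    constructor
    · intro off acc
      cases v with
      | false =>
        simp only [List.cons_append, computeIntervalsLoopA]
        rw [ihn (off + 1) acc, loopB_false_cons]
      | true =>
        simp only [List.cons_append, computeIntervalsLoopA]
        rw [ihs (off + 1) off acc]
        simp only [computeIntervalsLoopB, List.takeWhile, List.dropWhile,
          beq_self_eq_true, if_true, List.length_cons]
        push_cast
        ring_nf
        simp
    · intro off s acc
      cases v with
      | false =>
        simp only [List.cons_append, computeIntervalsLoopA]
        rw [ihn (off + 1) (acc ++ [(s, off)])]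
        simp only [List.takeWhile, List.dropWhile]
        norm_num [loopB_false_cons]
      | true =>
        simp only [List.cons_append, computeIntervalsLoopA]
        rw [ihs (off + 1) s acc]
        simp only [List.takeWhile, List.dropWhile, beq_self_eq_true, List.length_cons]
        push_cast
        ring_nf

-- ===== VERDICT (by name: the statement is the Claim_ definition above) =====
theorem compute_intervals_spec : Claim_equal_compute_intervals := by
  intro flags _
  unfold Spec_compute_intervals compute_intervals compute_intervals_alt
  simpa using (loopA_eq_loopB flags).1 0 []
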